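-- pv_equiv track=rewrite | github.com/Bangkit-B21-CAP0065/Panen.In-ML-Notebook | crop/crop.py | spaceremoval
-- ===== SOURCE A (Python) =====
-- def spaceremoval(input):
--         #space problem
--         result=""
--         count=1
--         for item in input.split():
--             if count==1 or count==len(input.split()):
--                 result+=item
--             else:
--                 result+=" "+item
--             count+=1
--         return result
-- ===== SOURCE B (Python) =====
-- def spaceremoval(input):
--     words = input.split()
--     if not words:
--         return ""
--     return " ".join(words[:-1]) + words[-1]
-- ===== Notes on version B (the rewrite author's own statement) =====
-- stated objective: simpler
-- what changed: Replaces the per-word loop with its index counter and first/last branch by a closed form: join all-but-last words with spaces and concatenate the last word (keeping A's glued-last-word behaviour).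
import Mathlib
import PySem

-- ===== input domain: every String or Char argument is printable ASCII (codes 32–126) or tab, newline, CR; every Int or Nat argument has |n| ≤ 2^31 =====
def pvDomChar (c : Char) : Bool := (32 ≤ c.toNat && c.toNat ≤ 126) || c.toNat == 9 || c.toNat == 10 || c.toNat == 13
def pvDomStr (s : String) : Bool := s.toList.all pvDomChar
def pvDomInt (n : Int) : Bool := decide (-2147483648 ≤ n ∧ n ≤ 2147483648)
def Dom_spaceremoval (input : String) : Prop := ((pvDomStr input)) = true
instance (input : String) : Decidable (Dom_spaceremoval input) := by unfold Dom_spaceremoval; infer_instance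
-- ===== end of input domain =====

-- B replaces A's counted loop with "join all-but-last words, then concatenate the last word" (simpler closed form, same glued-last-word result).


-- ===== PORT A =====
-- literal port of A: fold over input.split() carrying (result, count); first or last word appended bare, others with a leading space
def spaceremoval (input : String) : String :=
  let ws := PySem.Str.split₀ input
  (ws.foldl
    (fun (st : String × Int) item =>
      (if st.2 == 1 || st.2 == (ws.length : Int) then st.1 ++ item else st.1 ++ " " ++ item,
       st.2 + 1))
    ("", 1)).1

-- ===== PORT B =====
-- port of B: empty guard, then " ".join(words[:-1]) + words[-1]
def spaceremoval_alt (input : String) : String :=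
  let words := PySem.Str.split₀ input
  match words.getLast? with
  | none => ""
  | some last => PySem.Str.join " " words.dropLast ++ last

-- ===== PRECONDITION & SPEC =====
def Spec_spaceremoval (input : String) (out : String) : Prop := out = spaceremoval_alt input
instance (input : String) (out : String) : Decidable (Spec_spaceremoval input out) := by unfold Spec_spaceremoval; infer_instance

-- ===== CLAIM (what is proved, stated in full; the proofs are below) =====
def Claim_equal_spaceremoval : Prop := ∀ (input : String), Dom_spaceremoval input → Spec_spaceremoval input (spaceremoval input)

-- ===== LEMMAS AND PROOFS =====

-- the common shape of both results after the first word: interior words get a leading space, the last word is glued on bare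
def pvGlue : List String → String
  | [] => ""
  | [x] => x
  | x :: y :: r => " " ++ x ++ pvGlue (y :: r)

theorem pvJoin_nil : PySem.Str.join " " [] = "" := by
  rw [← String.toList_inj, PySem.Str.toList_join]; simp [PySem.Chars.join_nil]

theorem pvJoin_singleton (x : String) : PySem.Str.join " " [x] = x := by
  rw [← String.toList_inj, PySem.Str.toList_join]; simp [PySem.Chars.join_singleton]

theorem pvJoin_cons_cons (x y : String) (r : List String) :
    PySem.Str.join " " (x :: y :: r) = x ++ " " ++ PySem.Str.join " " (y :: r) := by
  rw [← String.toList_inj]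
  simp [String.toList_append, PySem.Str.toList_join, List.map_cons, PySem.Chars.join_cons_cons]

-- A's loop after the first word: starting from count = n - mid.length + 1 (which is ≥ 2 and hits n
-- exactly at the last word), the fold appends exactly pvGlue mid
theorem pvLoopA (n : Nat) :
    ∀ (mid : List String) (acc : String), mid.length < n →
    (mid.foldl
      (fun (st : String × Int) item =>
        (if st.2 == 1 || st.2 == (n : Int) then st.1 ++ item else st.1 ++ " " ++ item,
         st.2 + 1))
      (acc, (n : Int) - mid.length + 1)).1 = acc ++ pvGlue mid := by
  intro mid
  induction mid with
  | nil => intro acc _; simp [pvGlue]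
  | cons x rest ih =>
    intro acc hlen
    cases rest with
    | nil =>
      simp only [List.foldl_cons, List.foldl_nil, pvGlue]
      split_ifs with h
      · rfl
      · exfalso
        simp only [List.length_cons, List.length_nil, Bool.or_eq_true, beq_iff_eq, not_or] at h
        simp only [List.length_cons, List.length_nil] at hlen
        have h2 := h.2
        push_cast at h2
        push_cast at hlen
        omega
    | cons y r =>
      rw [List.foldl_cons]
      split_ifs with h
      · exfalso
        simp only [List.length_cons, Bool.or_eq_true, beq_iff_eq] at h
        simp only [List.length_cons] at hlen
        rcases h with h | h <;> (push_cast at h; omega)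
      · rw [show ((n : Int) - ((x :: y :: r : List String).length : Int) + 1) + 1
              = (n : Int) - ((y :: r : List String).length : Int) + 1 by
            push_cast [List.length_cons]; ring]
        rw [ih (acc ++ " " ++ x) (by simp only [List.length_cons] at hlen ⊢; omega)]
        simp [pvGlue, String.append_assoc]

-- B's closed form also equals pvGlue
theorem pvAltGlue : ∀ (mid : List String) (w : String),
    (match (w :: mid).getLast? with
     | none => ""
     | some last => PySem.Str.join " " (w :: mid).dropLast ++ last) = w ++ pvGlue mid := by
  intro mid
  induction mid with
  | nil => intro w; simp [pvGlue, pvJoin_nil]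
  | cons y r ih =>
    intro w
    cases hL : (y :: r).getLast? with
    | none => simp at hL
    | some L =>
      have ihy := ih y
      simp only [List.getLast?_cons_cons, hL] at ihy ⊢
      cases r with
      | nil =>
        simp only [List.getLast?_singleton, Option.some.injEq] at hL
        subst hL
        simp [pvGlue, pvJoin_singleton, List.dropLast]
      | cons z t =>
        simp only [List.dropLast_cons₂] at ihy ⊢
        rw [pvJoin_cons_cons]
        simp only [pvGlue, String.append_assoc] at ihy ⊢
        rw [ihy]

-- ===== VERDICT (by name: the statement is the Claim_ definition above) =====
theorem spaceremoval_spec : Claim_equal_spaceremoval := by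
  intro input _
  unfold Spec_spaceremoval spaceremoval spaceremoval_alt
  cases hws : PySem.Str.split₀ input with
  | nil => simp
  | cons w mid =>
    rw [pvAltGlue mid w]
    simp only [List.foldl_cons]
    split_ifs with h
    · rw [show (1 : Int) + 1
            = ((w :: mid : List String).length : Int) - (mid.length : Int) + 1 by
          push_cast [List.length_cons]; ring]
      rw [pvLoopA (w :: mid).length mid ("" ++ w) (by simp)]
      simp
    · exfalso; simp at h
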